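-- pv_equiv track=rewrite | github.com/SatoshiAndKin/argobytes-contracts | argobytes/cli/rarity/ability_score.py | array_rank
-- ===== SOURCE A (Python) =====
-- MAX_ODD_SCORES = 1
--
-- def ability_score_modifier(score):
--     return (score - 10) // 2
--
-- def array_rank(array, dump_stats):
--     # if 2 or more odds, ignore
--     num_odds = len([score for score in array if score % 2 == 1])
--     if num_odds > MAX_ODD_SCORES:
--         return None
--
--     modifiers = [ability_score_modifier(score) for score in array]
--
--     num_dump = len([mod for mod in modifiers if mod < 0])
--     if num_dump != dump_stats:
--         # if we pick a high dump stats to specialize, we dont want general arrays returned even if they have an equal score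
--         return None
--
--     # ignore the negative values on our rank
--     while num_dump and modifiers[-1] < 0:
--         modifiers.pop()
--         num_dump -= 1
--
--     return sum(modifiers)
-- ===== SOURCE B (Python) =====
-- MAX_ODD_SCORES = 1
--
-- def array_rank(array, dump_stats):
--     num_odds = 0
--     num_neg = 0
--     total = 0
--     pending = 0
--     for score in array:
--         if score % 2 == 1:
--             num_odds += 1
--         mod = (score - 10) // 2
--         if mod < 0:
--             num_neg += 1
--             pending += mod
--         else:
--             total += pending + mod
--             pending = 0
--     if num_odds > MAX_ODD_SCORES:
--         return None
--     if num_neg != dump_stats: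
--         return None
--     return total
-- ===== Notes on version B (the rewrite author's own statement) =====
-- stated objective: simpler
-- what changed: B replaces A's three list comprehensions plus the destructive pop-trailing-negatives while-loop with one forward pass that tallies odds and negatives and keeps a committed total plus a pending sum of the current negative run, discarding the trailing run at the end.
import Mathlib
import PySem

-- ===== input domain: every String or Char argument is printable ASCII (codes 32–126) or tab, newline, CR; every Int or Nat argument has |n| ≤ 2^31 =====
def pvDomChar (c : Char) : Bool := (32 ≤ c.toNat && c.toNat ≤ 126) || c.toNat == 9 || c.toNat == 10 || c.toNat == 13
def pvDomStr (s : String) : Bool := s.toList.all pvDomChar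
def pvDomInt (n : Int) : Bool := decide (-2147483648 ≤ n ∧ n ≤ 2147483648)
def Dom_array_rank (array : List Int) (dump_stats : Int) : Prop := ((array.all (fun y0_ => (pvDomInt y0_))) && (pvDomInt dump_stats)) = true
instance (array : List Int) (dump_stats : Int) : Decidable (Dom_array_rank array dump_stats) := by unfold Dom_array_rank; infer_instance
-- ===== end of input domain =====

-- One honest line: B replaces A's three comprehensions + destructive trailing-pop while-loop
-- with a single forward pass keeping a committed total and a pending negative-run sum (simpler decomposition).

-- ===== PORT A =====
-- `while num_dump and modifiers[-1] < 0: modifiers.pop(); num_dump -= 1`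
-- modifiers[-1] via PySem.List.pyGet?; `.getD 0` is only a totalizer: when the list is
-- empty pyGet? is none and then the guard 0 < 0 is false, matching the loop never reading
-- modifiers[-1] with num_dump = 0 (num_dump > 0 implies a negative element exists).
def pvPopLoop (mods : List Int) (nd : Int) : List Int :=
  if nd ≠ 0 ∧ (PySem.List.pyGet? mods (-1)).getD 0 < 0 then
    pvPopLoop mods.dropLast (nd - 1)
  else
    mods
termination_by mods.length
decreasing_by
  rename_i h
  cases mods with
  | nil => simp [PySem.List.pyGet?, PySem.List.pyIdx?] at h
  | cons a l => simp [List.length_dropLast]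

def array_rank (array : List Int) (dump_stats : Int) : Option Int :=
  let num_odds : Int := ((array.filter (fun score => PySem.Int.mod score 2 == 1)).length : Int)
  if num_odds > 1 then none
  else
    let modifiers := array.map (fun score => PySem.Int.floordiv (score - 10) 2)
    let num_dump : Int := ((modifiers.filter (fun m => decide (m < 0))).length : Int)
    if num_dump ≠ dump_stats then none
    else
      some (pvPopLoop modifiers num_dump).sum

-- ===== PORT B =====
def pvStep (st : Int × Int × Int × Int) (score : Int) : Int × Int × Int × Int :=
  let no := if PySem.Int.mod score 2 == 1 then st.1 + 1 else st.1
  let m := PySem.Int.floordiv (score - 10) 2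
  if m < 0 then (no, st.2.1 + 1, st.2.2.1, st.2.2.2 + m)
  else (no, st.2.1, st.2.2.1 + st.2.2.2 + m, 0)

def array_rank_alt (array : List Int) (dump_stats : Int) : Option Int :=
  let s := array.foldl pvStep (0, 0, 0, 0)
  if s.1 > 1 then none
  else if s.2.1 ≠ dump_stats then none
  else some s.2.2.1

-- ===== PRECONDITION & SPEC =====
def Spec_array_rank (array : List Int) (dump_stats : Int) (out : Option Int) : Prop := out = array_rank_alt array dump_stats
instance (array : List Int) (dump_stats : Int) (out : Option Int) : Decidable (Spec_array_rank array dump_stats out) := by unfold Spec_array_rank; infer_instance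

-- ===== CLAIM (what is proved, stated in full; the proofs are below) =====
def Claim_equal_array_rank : Prop := ∀ (array : List Int) (dump_stats : Int), Dom_array_rank array dump_stats → Spec_array_rank array dump_stats (array_rank array dump_stats)

-- ===== LEMMAS AND PROOFS =====

-- the modifier map
def pvF (s : Int) : Int := PySem.Int.floordiv (s - 10) 2

-- trailing-negative trimming, the common characterisation
def pvTrim (M : List Int) : List Int := (M.reverse.dropWhile (fun m => decide (m < 0))).reverse

def pvCntNeg (M : List Int) : Int := ((M.filter (fun m => decide (m < 0))).length : Int)

theorem pvTrim_append_neg (M : List Int) (x : Int) (hx : x < 0) :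
    pvTrim (M ++ [x]) = pvTrim M := by
  simp [pvTrim, hx]

theorem pvTrim_append_nonneg (M : List Int) (x : Int) (hx : ¬ x < 0) :
    pvTrim (M ++ [x]) = M ++ [x] := by
  simp [pvTrim, hx]

theorem pvCntNeg_append (M : List Int) (x : Int) :
    pvCntNeg (M ++ [x]) = pvCntNeg M + (if x < 0 then 1 else 0) := by
  simp [pvCntNeg]; split_ifs with h <;> simp [h]

theorem pvCntNeg_nonneg (M : List Int) : 0 ≤ pvCntNeg M := by
  simp [pvCntNeg]

-- A's pop loop fully removes the trailing negative run when nd = count of all negatives.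
theorem pvPopLoop_eq_trim (M : List Int) : pvPopLoop M (pvCntNeg M) = pvTrim M := by
  induction M using List.reverseRecOn with
  | nil => rw [pvPopLoop]; simp [pvCntNeg, pvTrim]
  | append_singleton M x ih =>
    rw [pvPopLoop]
    have hget : PySem.List.pyGet? (M ++ [x]) (-1) = some x := by
      rw [PySem.List.pyGet?_neg_one]; simp
    by_cases hx : x < 0
    · have hcnt : pvCntNeg (M ++ [x]) = pvCntNeg M + 1 := by
        rw [pvCntNeg_append]; simp [hx]
      have hne : pvCntNeg (M ++ [x]) ≠ 0 := by
        have := pvCntNeg_nonneg M; omega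
      rw [if_pos ⟨hne, by rw [hget]; simpa using hx⟩]
      rw [List.dropLast_concat, hcnt]
      simpa [pvTrim_append_neg M x hx] using ih
    · rw [if_neg (by rw [hget]; simp; intro _; omega)]
      rw [pvTrim_append_nonneg M x hx]

-- sum splits: sum M = sum (pvTrim M) + sum (dropped trailing run); we track both directly.
-- B's fold state after the whole list.
theorem pvFold_char (array : List Int) :
    array.foldl pvStep (0, 0, 0, 0) =
      (((array.filter (fun score => PySem.Int.mod score 2 == 1)).length : Int),
        pvCntNeg (array.map pvF),
        (pvTrim (array.map pvF)).sum,
        (array.map pvF).sum - (pvTrim (array.map pvF)).sum) := by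
  induction array using List.reverseRecOn with
  | nil => simp [pvCntNeg, pvTrim]
  | append_singleton l x ih =>
    rw [List.foldl_append, ih]
    simp only [List.foldl_cons, List.foldl_nil]
    unfold pvStep
    by_cases hm : pvF x < 0
    · rw [if_pos (by simpa [pvF] using hm)]
      have ht := pvTrim_append_neg (l.map pvF) (pvF x) hm
      have hc := pvCntNeg_append (l.map pvF) (pvF x)
      rw [if_pos hm] at hc
      simp only [Prod.mk.injEq]
      refine ⟨?_, ?_, ?_, ?_⟩
      · simp [List.filter_append]
        split_ifs with h <;> simp [h]
      · simpa [pvF] using hc.symm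
      · simp only [List.map_append, List.map_cons, List.map_nil, pvF] at ht ⊢
        rw [ht]
      · simp only [List.map_append, List.map_cons, List.map_nil, pvF] at ht ⊢
        rw [ht, List.sum_append]
        simp; ring
    · rw [if_neg (by simpa [pvF] using hm)]
      have ht := pvTrim_append_nonneg (l.map pvF) (pvF x) hm
      have hc := pvCntNeg_append (l.map pvF) (pvF x)
      rw [if_neg hm] at hc
      simp only [Prod.mk.injEq]
      refine ⟨?_, ?_, ?_, ?_⟩
      · simp [List.filter_append]
        split_ifs with h <;> simp [h]
      · simpa [pvF] using hc.symm
      · simp only [List.map_append, List.map_cons, List.map_nil, pvF] at ht ⊢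
        rw [ht, List.sum_append]
        simp
      · simp only [List.map_append, List.map_cons, List.map_nil, pvF] at ht ⊢
        rw [ht, List.sum_append]
        simp

-- ===== VERDICT (by name: the statement is the Claim_ definition above) =====
theorem array_rank_spec : Claim_equal_array_rank := by
  intro array dump_stats _
  unfold Spec_array_rank
  simp only [array_rank, array_rank_alt]
  rw [pvFold_char]
  have hf : (fun score : Int => PySem.Int.floordiv (score - 10) 2) = pvF := rfl
  simp only [hf]
  rw [show ((List.filter (fun m => decide (m < 0)) (array.map pvF)).length : Int)
        = pvCntNeg (array.map pvF) from rfl]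
  rw [pvPopLoop_eq_trim]
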